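-- pv_equiv track=rewrite | github.com/archimedessap/AI4Sci | scripts/analyze_problem_method_map.py | descendants
-- ===== SOURCE A (Python) =====
-- def descendants(root_id: str, children: dict[str, list[str]]) -> set[str]:
--     out: set[str] = set()
--     stack = [root_id]
--     while stack:
--         cur = stack.pop()
--         if cur in out:
--             continue
--         out.add(cur)
--         stack.extend(children.get(cur, []))
--     return out
-- ===== SOURCE B (Python) =====
-- def descendants(root_id: str, children: dict[str, list[str]]) -> set[str]:
--     out: set[str] = set()
--
--     def visit(node: str) -> None:
--         if node in out:
--             return
--         out.add(node)
--         # child visit order is irrelevant for the resulting set; right-to-left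
--         # mirrors the LIFO pop order of the obvious worklist formulation
--         for c in reversed(children.get(node, [])):
--             visit(c)
--
--     visit(root_id)
--     return out
-- ===== Notes on version B (the rewrite author's own statement) =====
-- stated objective: alternative
-- what changed: Replaced the explicit worklist loop (stack of pending nodes, pop/extend, visited-check at pop) by a recursive depth-first visit function that checks the shared visited set at entry and recurses over a node's children.
import Mathlib
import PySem

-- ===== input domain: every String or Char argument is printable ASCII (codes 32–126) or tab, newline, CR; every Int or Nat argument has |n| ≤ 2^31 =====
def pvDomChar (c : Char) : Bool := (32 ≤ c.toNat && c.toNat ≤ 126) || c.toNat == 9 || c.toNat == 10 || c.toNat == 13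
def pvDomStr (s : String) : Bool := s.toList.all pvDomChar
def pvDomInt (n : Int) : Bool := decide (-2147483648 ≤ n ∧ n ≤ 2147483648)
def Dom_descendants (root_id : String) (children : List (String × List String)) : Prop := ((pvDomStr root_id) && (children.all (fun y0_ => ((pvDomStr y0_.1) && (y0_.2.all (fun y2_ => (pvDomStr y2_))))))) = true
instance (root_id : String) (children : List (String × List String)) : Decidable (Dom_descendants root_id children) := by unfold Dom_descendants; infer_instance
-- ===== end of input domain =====

-- B replaces A's explicit worklist loop by a recursive depth-first visit with a shared
-- visited set (alternative decomposition; same reachable-set semantics and cost).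


-- ===== PORT A =====
-- children.get(cur, []) on the association list (Python dict lookup)
def pvKids (children : List (String × List String)) (k : String) : List String :=
  PySem.Dict.getD (PySem.Dict.mk children) k []

-- the while-loop: pop from the end of `stack`, skip visited, else add and extend.
-- The Nat argument is a totality fuel; 2 + Σ|child lists| iterations always suffice
-- (each fresh node extends the stack at most once), so the 0-branch is never reached.
def descendantsLoop (children : List (String × List String)) :
    Nat → List String → List String → List String
  | _, out, [] => out
  | 0, out, _ :: _ => out
  | f + 1, out, x :: rest =>
    let cur := (x :: rest).getLast (List.cons_ne_nil x rest)
    let s := (x :: rest).dropLast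
    if cur ∈ out then descendantsLoop children f out s
    else descendantsLoop children f (PySem.Set.add out cur) (s ++ pvKids children cur)

def descendants (root_id : String) (children : List (String × List String)) : List String :=
  descendantsLoop children (2 + (children.map (fun p => p.2.length)).sum)
    PySem.Set.empty [root_id]

-- ===== PORT B =====
-- visit(node): return if seen, else add node and recurse over reversed children.
-- The Nat argument is a totality fuel; recursion depth is bounded by the number of
-- distinct reachable nodes, so 1 + |root :: all child lists| always suffices.
def visitB (children : List (String × List String)) :
    Nat → String → List String → List String
  | 0, _, out => out
  | f + 1, node, out =>
    if node ∈ out then out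
    else (pvKids children node).reverse.foldl
      (fun o c => visitB children f c o) (PySem.Set.add out node)

def descendants_alt (root_id : String) (children : List (String × List String)) : List String :=
  visitB children ((root_id :: children.flatMap (fun p => p.2)).length + 1)
    root_id PySem.Set.empty

-- ===== PRECONDITION & SPEC =====
def Spec_descendants (root_id : String) (children : List (String × List String)) (out : List String) : Prop := out = descendants_alt root_id children
instance (root_id : String) (children : List (String × List String)) (out : List String) : Decidable (Spec_descendants root_id children out) := by unfold Spec_descendants; infer_instance

-- ===== CLAIM (what is proved, stated in full; the proofs are below) =====
def Claim_equal_descendants : Prop := ∀ (root_id : String) (children : List (String × List String)), Dom_descendants root_id children → Spec_descendants root_id children (descendants root_id children)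

-- ===== LEMMAS AND PROOFS =====

-- number of universe elements not yet visited (termination measure of the DFS)
def pvUnseen (V out : List String) : Nat :=
  (V.filter (fun x => decide (x ∉ out))).length

-- total length of the child lists of not-yet-visited keys (fuel potential of the loop)
def pvPhi (children : List (String × List String)) (out : List String) : Nat :=
  ((children.filter (fun p => decide (p.1 ∉ out))).map (fun p => p.2.length)).sum

lemma pvSet_add_not_mem (s : List String) (x : String) (h : x ∉ s) :
    PySem.Set.add s x = s ++ [x] := by
  simp [PySem.Set.add, PySem.Set.contains, h]

lemma pvKids_cons (k : String) (v : List String) (t : List (String × List String))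
    (cur : String) :
    pvKids ((k, v) :: t) cur = if k == cur then v else pvKids t cur := by
  unfold pvKids
  rw [PySem.Dict.getD_eq_get?_getD, PySem.Dict.get?_mk_cons]
  split <;> simp [PySem.Dict.getD_eq_get?_getD]

lemma pvKids_mem (children : List (String × List String)) (k x : String)
    (h : x ∈ pvKids children k) : x ∈ children.flatMap (fun p => p.2) := by
  induction children with
  | nil =>
    simp [pvKids, PySem.Dict.getD_eq_get?_getD, PySem.Dict.get?] at h
  | cons p t ih =>
    obtain ⟨a, v⟩ := p
    rw [pvKids_cons] at h
    by_cases hk : a == k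
    · rw [if_pos hk] at h
      exact List.mem_flatMap.mpr ⟨(a, v), List.mem_cons_self, h⟩
    · rw [if_neg hk] at h
      rcases List.mem_flatMap.mp (ih h) with ⟨q, hq, hx⟩
      exact List.mem_flatMap.mpr ⟨q, List.mem_cons_of_mem _ hq, hx⟩

lemma pvUnseen_cons (a : String) (t o : List String) :
    pvUnseen (a :: t) o = (if a ∈ o then 0 else 1) + pvUnseen t o := by
  unfold pvUnseen
  by_cases h : a ∈ o
  · rw [List.filter_cons_of_neg (by simp [h]), if_pos h]
    omega
  · rw [List.filter_cons_of_pos (by simp [h]), if_neg h, List.length_cons]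
    omega

lemma pvPhi_cons (p : String × List String) (t : List (String × List String))
    (o : List String) :
    pvPhi (p :: t) o = (if p.1 ∈ o then 0 else p.2.length) + pvPhi t o := by
  unfold pvPhi
  by_cases h : p.1 ∈ o
  · rw [List.filter_cons_of_neg (by simp [h]), if_pos h]
    omega
  · rw [List.filter_cons_of_pos (by simp [h]), if_neg h, List.map_cons, List.sum_cons]

lemma pvUnseen_antitone (V o o' : List String) (h : ∀ x ∈ o, x ∈ o') :
    pvUnseen V o' ≤ pvUnseen V o := by
  induction V with
  | nil => simp [pvUnseen]
  | cons a t ih =>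
    rw [pvUnseen_cons, pvUnseen_cons]
    by_cases hao : a ∈ o
    · simp only [hao, h a hao, if_true]
      omega
    · by_cases ha' : a ∈ o' <;> simp only [hao, ha', if_true, if_false] <;> omega

lemma pvUnseen_lt (V o o' : List String) (cur : String) (hc : cur ∈ V)
    (hno : cur ∉ o) (hsub : ∀ x ∈ o, x ∈ o') (hc' : cur ∈ o') :
    pvUnseen V o' < pvUnseen V o := by
  induction V with
  | nil => exact absurd hc (List.not_mem_nil)
  | cons a t ih =>
    rw [pvUnseen_cons, pvUnseen_cons]
    rcases List.mem_cons.mp hc with rfl | hct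
    · have hmono := pvUnseen_antitone t o o' hsub
      simp only [hno, hc', if_true, if_false]
      omega
    · have hlt := ih hct
      by_cases hao : a ∈ o
      · simp only [hao, hsub a hao, if_true]
        omega
      · by_cases ha' : a ∈ o' <;> simp only [hao, ha', if_true, if_false] <;> omega

lemma pvUnseen_pos (V o : List String) (cur : String) (hc : cur ∈ V) (hno : cur ∉ o) :
    1 ≤ pvUnseen V o := by
  have hmem : cur ∈ V.filter (fun x => decide (x ∉ o)) :=
    List.mem_filter.mpr ⟨hc, by simp [hno]⟩
  have := List.length_pos_of_mem hmem
  unfold pvUnseen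
  omega

lemma pvPhi_antitone (children : List (String × List String)) (o o' : List String)
    (h : ∀ x ∈ o, x ∈ o') : pvPhi children o' ≤ pvPhi children o := by
  induction children with
  | nil => simp [pvPhi]
  | cons p t ih =>
    rw [pvPhi_cons, pvPhi_cons]
    by_cases hao : p.1 ∈ o
    · simp only [hao, h _ hao, if_true]
      omega
    · by_cases ha' : p.1 ∈ o' <;> simp only [hao, ha', if_true, if_false] <;> omega

lemma pvPhi_step (children : List (String × List String)) (out : List String)
    (cur : String) (h : cur ∉ out) :
    pvPhi children (out ++ [cur]) + (pvKids children cur).length ≤ pvPhi children out := by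
  induction children with
  | nil => simp [pvPhi, pvKids, PySem.Dict.getD_eq_get?_getD, PySem.Dict.get?]
  | cons p t ih =>
    obtain ⟨k, v⟩ := p
    rw [pvKids_cons, pvPhi_cons, pvPhi_cons]
    by_cases hk : k == cur
    · have hk' : k = cur := by simpa using hk
      rw [if_pos hk, if_pos (show (k, v).1 ∈ out ++ [cur] by simp [hk']),
        if_neg (show (k, v).1 ∉ out from hk' ▸ h)]
      have hmono := pvPhi_antitone t out (out ++ [cur])
        (fun x hx => List.mem_append.mpr (Or.inl hx))
      have hv : ((k, v).2).length = v.length := rfl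
      omega
    · have hk' : ¬ k = cur := by simpa using hk
      rw [if_neg hk]
      have hiff : (k, v).1 ∈ out ++ [cur] ↔ (k, v).1 ∈ out := by simp [hk']
      by_cases hko : (k, v).1 ∈ out
      · rw [if_pos (hiff.mpr hko), if_pos hko]
        omega
      · rw [if_neg (fun hx => hko (hiff.mp hx)), if_neg hko]
        omega

lemma pvPhi_nil (children : List (String × List String)) :
    pvPhi children [] = (children.map (fun p => p.2.length)).sum := by
  simp [pvPhi]

lemma pvUnseen_nil (V : List String) : pvUnseen V [] = V.length := by
  simp [pvUnseen]

-- generic fold shape lemmas --------------------------------------------------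
lemma pvFoldl_prefix (F : List String → String → List String)
    (hF : ∀ o c, o <+: F o c) : ∀ (l : List String) (o : List String), o <+: l.foldl F o := by
  intro l
  induction l with
  | nil => intro o; exact List.prefix_refl o
  | cons c t ih =>
    intro o
    exact (hF o c).trans (ih (F o c))

lemma pvFoldl_subset (V : List String) (F : List String → String → List String)
    (hF : ∀ o c, (∀ x ∈ o, x ∈ V) → c ∈ V → ∀ x ∈ F o c, x ∈ V) :
    ∀ (l : List String) (o : List String), (∀ c ∈ l, c ∈ V) → (∀ x ∈ o, x ∈ V) →
      ∀ x ∈ l.foldl F o, x ∈ V := by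
  intro l
  induction l with
  | nil => intro o _ ho; simpa using ho
  | cons c t ih =>
    intro o hl ho
    exact ih (F o c) (fun d hd => hl d (List.mem_cons_of_mem _ hd))
      (hF o c ho (hl c List.mem_cons_self))

lemma pvFoldr_prefix (F : String → List String → List String)
    (hF : ∀ c o, o <+: F c o) : ∀ (l : List String) (o : List String), o <+: l.foldr F o := by
  intro l
  induction l with
  | nil => intro o; exact List.prefix_refl o
  | cons c t ih =>
    intro o
    exact (ih o).trans (hF c (t.foldr F o))

lemma pvFoldr_subset (V : List String) (F : String → List String → List String)
    (hF : ∀ c o, c ∈ V → (∀ x ∈ o, x ∈ V) → ∀ x ∈ F c o, x ∈ V) :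
    ∀ (l : List String) (o : List String), (∀ c ∈ l, c ∈ V) → (∀ x ∈ o, x ∈ V) →
      ∀ x ∈ l.foldr F o, x ∈ V := by
  intro l
  induction l with
  | nil => intro o _ ho; simpa using ho
  | cons c t ih =>
    intro o hl ho
    exact hF c (t.foldr F o) (hl c List.mem_cons_self)
      (ih o (fun d hd => hl d (List.mem_cons_of_mem _ hd)) ho)

-- properties of the recursive visit ------------------------------------------
lemma pvVisit_prefix (children : List (String × List String)) :
    ∀ (f : Nat) (node : String) (out : List String), out <+: visitB children f node out := by
  intro f
  induction f with
  | zero => intro node out; simp [visitB]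
  | succ f ih =>
    intro node out
    by_cases h : node ∈ out
    · simp [visitB, h]
    · rw [visitB, if_neg h, pvSet_add_not_mem out node h]
      exact (List.prefix_append out [node]).trans
        (pvFoldl_prefix _ (fun o c => ih c o) _ _)

lemma pvVisit_subset (children : List (String × List String)) (V : List String)
    (hK : ∀ k x, x ∈ pvKids children k → x ∈ V) :
    ∀ (f : Nat) (node : String) (out : List String), node ∈ V → (∀ x ∈ out, x ∈ V) →
      ∀ y ∈ visitB children f node out, y ∈ V := by
  intro f
  induction f with
  | zero => intro node out _ ho; simpa [visitB] using ho
  | succ f ih =>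
    intro node out hn ho
    by_cases h : node ∈ out
    · simpa [visitB, h] using ho
    · rw [visitB, if_neg h, pvSet_add_not_mem out node h]
      refine pvFoldl_subset V _ (fun o c hoV hcV => ih c o hcV hoV) _ _
        (fun c hc => hK node c (List.mem_reverse.mp hc)) ?_
      intro x hx
      rcases List.mem_append.mp hx with hx | hx
      · exact ho x hx
      · simpa using (List.mem_singleton.mp hx) ▸ hn

lemma pvVisit_irrel (children : List (String × List String)) (V : List String)
    (hK : ∀ k x, x ∈ pvKids children k → x ∈ V) :
    ∀ (n f g : Nat) (node : String) (out : List String), node ∈ V → (∀ x ∈ out, x ∈ V) →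
      pvUnseen V out ≤ n → pvUnseen V out + 1 ≤ f → pvUnseen V out + 1 ≤ g →
      visitB children f node out = visitB children g node out := by
  intro n
  induction n with
  | zero =>
    intro f g node out hn ho _ hf hg
    obtain ⟨f', rfl⟩ : ∃ f', f = f' + 1 := ⟨f - 1, by omega⟩
    obtain ⟨g', rfl⟩ : ∃ g', g = g' + 1 := ⟨g - 1, by omega⟩
    by_cases h : node ∈ out
    · simp [visitB, h]
    · exact absurd (pvUnseen_pos V out node hn h) (by omega)
  | succ n ih =>
    intro f g node out hn ho hun hf hg
    obtain ⟨f', rfl⟩ : ∃ f', f = f' + 1 := ⟨f - 1, by omega⟩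
    obtain ⟨g', rfl⟩ : ∃ g', g = g' + 1 := ⟨g - 1, by omega⟩
    by_cases h : node ∈ out
    · simp [visitB, h]
    · rw [visitB, visitB, if_neg h, if_neg h, pvSet_add_not_mem out node h]
      have hstart : pvUnseen V (out ++ [node]) < pvUnseen V out :=
        pvUnseen_lt V out (out ++ [node]) node hn h (fun x hx => by simp [hx]) (by simp)
      have hsubV : ∀ x ∈ out ++ [node], x ∈ V := by
        intro x hx
        rcases List.mem_append.mp hx with hx | hx
        · exact ho x hx
        · simpa using (List.mem_singleton.mp hx) ▸ hn
      have aux : ∀ (l : List String) (o : List String), (∀ c ∈ l, c ∈ V) →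
          (∀ x ∈ o, x ∈ V) → pvUnseen V o < pvUnseen V out →
          l.foldl (fun o c => visitB children f' c o) o =
          l.foldl (fun o c => visitB children g' c o) o := by
        intro l
        induction l with
        | nil => intro o _ _ _; rfl
        | cons c t iht =>
          intro o hl hoV hlt
          have h1 : visitB children f' c o = visitB children g' c o :=
            ih f' g' c o (hl c List.mem_cons_self) hoV (by omega) (by omega) (by omega)
          have h2 : ∀ x ∈ visitB children g' c o, x ∈ V :=
            pvVisit_subset children V hK g' c o (hl c List.mem_cons_self) hoV
          have h3 : pvUnseen V (visitB children g' c o) ≤ pvUnseen V o :=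
            pvUnseen_antitone V o _ (pvVisit_prefix children g' c o).subset
          simp only [List.foldl_cons, h1]
          exact iht (visitB children g' c o)
            (fun d hd => hl d (List.mem_cons_of_mem _ hd)) h2 (by omega)
      exact aux _ _ (fun c hc => hK node c (List.mem_reverse.mp hc)) hsubV hstart

-- the central simulation: the worklist loop is the right fold of the visit
lemma pvLoop_eq (children : List (String × List String)) (V : List String)
    (hK : ∀ k x, x ∈ pvKids children k → x ∈ V) :
    ∀ (fA : Nat) (out stack : List String), (∀ x ∈ out, x ∈ V) → (∀ x ∈ stack, x ∈ V) →
      stack.length + pvPhi children out + 1 ≤ fA →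
      descendantsLoop children fA out stack =
        stack.foldr (fun x o => visitB children (pvUnseen V o + 1) x o) out := by
  intro fA
  induction fA with
  | zero => intro out stack _ _ hfuel; omega
  | succ f ih =>
    intro out stack hout hstack hfuel
    match stack with
    | [] => rfl
    | x :: rest =>
      have hne : x :: rest ≠ [] := List.cons_ne_nil x rest
      set cur := (x :: rest).getLast hne with hcur_def
      set s := (x :: rest).dropLast with hs_def
      have hsplit : s ++ [cur] = x :: rest := List.dropLast_concat_getLast hne
      have hlen : s.length + 1 = (x :: rest).length := by
        rw [← hsplit]; simp
      have hcurV : cur ∈ V := hstack cur (List.getLast_mem hne)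
      have hsV : ∀ y ∈ s, y ∈ V := by
        intro y hy
        exact hstack y (by rw [← hsplit]; exact List.mem_append.mpr (Or.inl hy))
      have hfold : (x :: rest).foldr (fun x o => visitB children (pvUnseen V o + 1) x o) out
          = s.foldr (fun x o => visitB children (pvUnseen V o + 1) x o)
              (visitB children (pvUnseen V out + 1) cur out) := by
        rw [← hsplit, List.foldr_append]
        rfl
      by_cases hmem : cur ∈ out
      · rw [descendantsLoop, if_pos hmem, hfold]
        rw [show visitB children (pvUnseen V out + 1) cur out = out by simp [visitB, hmem]]
        exact ih out s hout hsV (by simp only [List.length_cons] at hfuel hlen; omega)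
      · rw [descendantsLoop, if_neg hmem, pvSet_add_not_mem out cur hmem]
        have hkidsV : ∀ y ∈ pvKids children cur, y ∈ V := fun y hy => hK cur y hy
        have houtV : ∀ y ∈ out ++ [cur], y ∈ V := by
          intro y hy
          rcases List.mem_append.mp hy with hy | hy
          · exact hout y hy
          · simpa using (List.mem_singleton.mp hy) ▸ hcurV
        have hstep := pvPhi_step children out cur hmem
        have hLHS := ih (out ++ [cur]) (s ++ pvKids children cur) houtV
          (by intro y hy; rcases List.mem_append.mp hy with hy | hy
              exacts [hsV y hy, hkidsV y hy])
          (by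
            have hlapp : (s ++ pvKids children cur).length
                = s.length + (pvKids children cur).length := List.length_append
            simp only [List.length_cons] at hfuel hlen
            omega)
        rw [hLHS, List.foldr_append, hfold]
        congr 1
        -- both inner folds over the kids agree, adjusting the visit fuel
        rw [show visitB children (pvUnseen V out + 1) cur out =
              (pvKids children cur).reverse.foldl
                (fun o c => visitB children (pvUnseen V out) c o) (out ++ [cur]) by
            rw [visitB, if_neg hmem, pvSet_add_not_mem out cur hmem]]
        rw [List.foldl_reverse]
        have aux : ∀ (l : List String), (∀ c ∈ l, c ∈ V) →
            l.foldr (fun x y => visitB children (pvUnseen V out) x y) (out ++ [cur]) =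
            l.foldr (fun x o => visitB children (pvUnseen V o + 1) x o) (out ++ [cur]) := by
          intro l
          induction l with
          | nil => intro _; rfl
          | cons c t iht =>
            intro hl
            have hrec := iht (fun d hd => hl d (List.mem_cons_of_mem _ hd))
            simp only [List.foldr_cons, hrec]
            set o' := t.foldr (fun x o => visitB children (pvUnseen V o + 1) x o)
              (out ++ [cur]) with ho'_def
            have hpre : (out ++ [cur]) <+: o' :=
              pvFoldr_prefix _ (fun c o => pvVisit_prefix children _ c o) t (out ++ [cur])
            have ho'V : ∀ y ∈ o', y ∈ V :=
              pvFoldr_subset V _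
                (fun c o hc ho => pvVisit_subset children V hK _ c o hc ho)
                t (out ++ [cur]) (fun d hd => hl d (List.mem_cons_of_mem _ hd)) houtV
            have hlt : pvUnseen V o' < pvUnseen V out :=
              pvUnseen_lt V out o' cur hcurV hmem
                (fun y hy => hpre.subset (List.mem_append.mpr (Or.inl hy)))
                (hpre.subset (by simp))
            exact pvVisit_irrel children V hK (pvUnseen V o') (pvUnseen V out)
              (pvUnseen V o' + 1) c o' (hl c List.mem_cons_self) ho'V (le_refl _)
              (by omega) (by omega)
        exact (aux (pvKids children cur) hkidsV).symm

-- ===== VERDICT (by name: the statement is the Claim_ definition above) =====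
theorem descendants_spec : Claim_equal_descendants := by
  intro root_id children _
  unfold Spec_descendants descendants descendants_alt
  have hK : ∀ k x, x ∈ pvKids children k →
      x ∈ root_id :: children.flatMap (fun p => p.2) :=
    fun k x h => List.mem_cons_of_mem _ (pvKids_mem children k x h)
  have h1 := pvLoop_eq children (root_id :: children.flatMap (fun p => p.2)) hK
    (2 + (children.map (fun p => p.2.length)).sum) [] [root_id]
    (by simp) (by intro y hy; rw [List.mem_singleton] at hy; exact hy ▸ List.mem_cons_self)
    (by rw [pvPhi_nil]; simp only [List.length_singleton]; omega)
  rw [show PySem.Set.empty = ([] : List String) from rfl, h1]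
  simp only [List.foldr_cons, List.foldr_nil]
  rw [pvUnseen_nil]
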